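-- pv_equiv track=rewrite | github.com/kruinfosec/Aegis | simulation/scenarios/weak_randomness.py | _find_function_context
-- ===== SOURCE A (Python) =====
-- from typing import Any, Dict, List, Optional
--
-- def _find_function_context(functions: list, contract_name: Optional[str], function_name: str) -> Optional[dict]:
--     for function in functions:
--         if function.get("name") != function_name:
--             continue
--         if contract_name and function.get("contract_name") != contract_name:
--             continue
--         return function
--     for function in functions:
--         if function.get("name") == function_name:
--             return function
--     return None
-- ===== SOURCE B (Python) =====
-- def _find_function_context(functions: list, contract_name, function_name: str):
--     fallback = None
--     for function in functions:
--         if function.get("name") == function_name: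
--             if contract_name and function.get("contract_name") == contract_name:
--                 return function
--             if fallback is None:
--                 fallback = function
--     return fallback
-- ===== Notes on version B (the rewrite author's own statement) =====
-- stated objective: simpler
-- what changed: Replaced A's two sequential scans with a single pass that returns immediately on a full name+contract match and keeps the first name-only match as fallback.
import Mathlib
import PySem

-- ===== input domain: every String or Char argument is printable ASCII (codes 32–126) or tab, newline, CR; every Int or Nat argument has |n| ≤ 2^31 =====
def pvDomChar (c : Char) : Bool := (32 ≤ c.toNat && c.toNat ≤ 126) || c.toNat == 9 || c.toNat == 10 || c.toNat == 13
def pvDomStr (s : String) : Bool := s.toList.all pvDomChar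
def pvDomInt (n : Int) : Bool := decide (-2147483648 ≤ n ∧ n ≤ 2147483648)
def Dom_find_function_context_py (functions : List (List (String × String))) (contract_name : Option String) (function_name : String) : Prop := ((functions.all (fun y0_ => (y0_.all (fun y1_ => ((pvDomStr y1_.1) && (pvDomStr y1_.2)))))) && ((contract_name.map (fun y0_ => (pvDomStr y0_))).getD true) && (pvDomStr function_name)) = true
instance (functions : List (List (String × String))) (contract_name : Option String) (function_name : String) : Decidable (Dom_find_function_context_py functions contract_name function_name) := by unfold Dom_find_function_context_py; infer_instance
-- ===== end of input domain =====

-- B is a single pass keeping the first name-only match as a fallback, instead of A's two sequential scans.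

-- ===== PORT A =====
-- dict.get(k): first-match lookup in the association list (dicts arrive as assoc lists)
def pvGetKey (f : List (String × String)) (k : String) : Option String :=
  (f.find? (fun p => p.1 == k)).map (·.2)

-- Python truthiness of the Optional[str] contract_name: non-None and non-empty
def pvTruthy (cn : Option String) : Bool :=
  match cn with
  | none => false
  | some s => !(s == "")

-- first loop: skip (continue) on name mismatch, skip when contract_name is truthy and mismatches, else return
def find_function_context_py (functions : List (List (String × String))) (contract_name : Option String) (function_name : String) : Option (List (String × String)) :=
  match functions.find? (fun f =>
      (pvGetKey f "name" == some function_name) &&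
      (!(pvTruthy contract_name) || pvGetKey f "contract_name" == contract_name)) with
  | some f => some f
  | none =>
    -- second loop: first name-only match, else None
    functions.find? (fun f => pvGetKey f "name" == some function_name)

-- ===== PORT B =====
def findAltGo (contract_name : Option String) (function_name : String) :
    List (List (String × String)) → Option (List (String × String)) → Option (List (String × String))
  | [], fallback => fallback
  | f :: rest, fallback =>
    if pvGetKey f "name" == some function_name then
      if pvTruthy contract_name && (pvGetKey f "contract_name" == contract_name) then
        some f
      else
        findAltGo contract_name function_name rest (if fallback.isNone then some f else fallback)
    else
      findAltGo contract_name function_name rest fallback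

def find_function_context_py_alt (functions : List (List (String × String))) (contract_name : Option String) (function_name : String) : Option (List (String × String)) :=
  findAltGo contract_name function_name functions none

-- ===== PRECONDITION & SPEC =====
def Spec_find_function_context_py (functions : List (List (String × String))) (contract_name : Option String) (function_name : String) (out : Option (List (String × String))) : Prop := out = find_function_context_py_alt functions contract_name function_name
instance (functions : List (List (String × String))) (contract_name : Option String) (function_name : String) (out : Option (List (String × String))) : Decidable (Spec_find_function_context_py functions contract_name function_name out) := by unfold Spec_find_function_context_py; infer_instance

-- ===== CLAIM (what is proved, stated in full; the proofs are below) =====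
def Claim_equal_find_function_context_py : Prop := ∀ (functions : List (List (String × String))) (contract_name : Option String) (function_name : String), Dom_find_function_context_py functions contract_name function_name → Spec_find_function_context_py functions contract_name function_name (find_function_context_py functions contract_name function_name)

-- ===== LEMMAS AND PROOFS =====

-- When contract_name is falsy, B never early-returns: it yields the fallback if set, else the first name match.
theorem findAltGo_falsy (cn : Option String) (fn : String) (h : pvTruthy cn = false)
    (fs : List (List (String × String))) (fb : Option (List (String × String))) :
    findAltGo cn fn fs fb =
      match fb with
      | some x => some x
      | none => fs.find? (fun f => pvGetKey f "name" == some fn) := by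
  induction fs generalizing fb with
  | nil => cases fb <;> simp [findAltGo]
  | cons f rest ih =>
    by_cases hn : (pvGetKey f "name" == some fn) = true
    · cases fb <;> simp [findAltGo, hn, h, List.find?, ih]
    · cases fb <;> simp [findAltGo, hn, List.find?, ih]

-- When contract_name is truthy, B returns the first full match; otherwise the fallback / first name match.
theorem findAltGo_truthy (cn : Option String) (fn : String) (h : pvTruthy cn = true)
    (fs : List (List (String × String))) (fb : Option (List (String × String))) :
    findAltGo cn fn fs fb =
      match fs.find? (fun f => (pvGetKey f "name" == some fn) && (pvGetKey f "contract_name" == cn)) with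
      | some f => some f
      | none =>
        match fb with
        | some x => some x
        | none => fs.find? (fun f => pvGetKey f "name" == some fn) := by
  induction fs generalizing fb with
  | nil => cases fb <;> simp [findAltGo]
  | cons f rest ih =>
    by_cases hn : (pvGetKey f "name" == some fn) = true
    · by_cases hc : (pvGetKey f "contract_name" == cn) = true
      · simp [findAltGo, hn, hc, h, List.find?]
      · cases fb <;> simp [findAltGo, hn, hc, h, List.find?, ih]
    · cases fb <;> simp [findAltGo, hn, List.find?] <;> rw [ih]

-- ===== VERDICT (by name: the statement is the Claim_ definition above) =====
theorem find_function_context_py_spec : Claim_equal_find_function_context_py := by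
  intro fs cn fn _
  unfold Spec_find_function_context_py find_function_context_py find_function_context_py_alt
  by_cases h : pvTruthy cn = true
  · rw [findAltGo_truthy cn fn h]
    simp [h]
  · rw [findAltGo_falsy cn fn (by simpa using h)]
    simp [Bool.not_eq_true] at h
    simp [h]
    split <;> simp_all
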